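-- pv_equiv track=rewrite | github.com/tduffy000/exercises | leetcode/python/easy/290-word-pattern.py | convert_to_numbering
-- ===== SOURCE A (Python) =====
-- def convert_to_numbering(s):
--     numbering = []
--     seen = {} # {ch | str} -> number
--
--     for el in s:
--         if el not in seen:
--             seen[el] = len(seen)
--         numbering.append(seen[el])
--     return numbering
-- ===== SOURCE B (Python) =====
-- def convert_to_numbering(s):
--     # The canonical number of an element is the count of distinct elements
--     # strictly before its first occurrence: no dict/seen-table is maintained.
--     s = list(s)
--     return [len(set(s[:s.index(el)])) for el in s]
-- ===== Notes on version B (the rewrite author's own statement) =====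
-- stated objective: alternative
-- what changed: Drops the seen-dict entirely: each element's number is computed directly as the count of distinct elements in the prefix before its first occurrence, len(set(s[:s.index(el)])), instead of maintaining an incrementally-filled element-to-number dictionary.
import Mathlib
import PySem

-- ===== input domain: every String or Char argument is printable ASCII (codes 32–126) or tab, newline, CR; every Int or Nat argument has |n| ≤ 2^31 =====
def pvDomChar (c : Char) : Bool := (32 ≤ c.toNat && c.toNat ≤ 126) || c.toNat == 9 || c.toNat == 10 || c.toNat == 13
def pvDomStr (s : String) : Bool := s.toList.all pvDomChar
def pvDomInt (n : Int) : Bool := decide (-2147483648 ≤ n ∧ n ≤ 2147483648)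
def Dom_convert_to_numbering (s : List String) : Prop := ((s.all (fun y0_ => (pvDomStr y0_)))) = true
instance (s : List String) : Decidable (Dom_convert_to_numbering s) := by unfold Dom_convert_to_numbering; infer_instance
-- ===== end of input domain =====

-- B drops A's seen-dict entirely: each element's number is the count of distinct elements before its first occurrence (len(set(s[:s.index(el)]))); alternative algorithm, not faster.


-- ===== PORT A =====
-- one loop iteration: 'if el not in seen: seen[el] = len(seen)' then 'numbering.append(seen[el])'
-- ('seen[el]' always succeeds here — el was just inserted if absent — so '.getD 0' is exact)
def convertStep (acc : List Int × PySem.Dict String Int) (el : String) :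
    List Int × PySem.Dict String Int :=
  let seen := if acc.2.contains el then acc.2 else acc.2.insert el (acc.2.size : Int)
  (acc.1 ++ [((seen.get? el).getD 0)], seen)

def convert_to_numbering (s : List String) : List Int :=
  (s.foldl convertStep ([], PySem.Dict.empty)).1

-- ===== PORT B =====
-- [len(set(s[:s.index(el)])) for el in s]
-- ('s.index(el)' always succeeds — el is drawn from s — so '.getD 0' is exact)
def convert_to_numbering_alt (s : List String) : List Int :=
  s.map (fun el =>
    ((PySem.Set.len (PySem.Set.ofList
        (PySem.List.slice s none (some ((((PySem.List.index? s el).getD 0) : Nat) : Int))))) : Int))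

-- ===== PRECONDITION & SPEC =====
def Spec_convert_to_numbering (s : List String) (out : List Int) : Prop := out = convert_to_numbering_alt s
instance (s : List String) (out : List Int) : Decidable (Spec_convert_to_numbering s out) := by unfold Spec_convert_to_numbering; infer_instance

-- ===== CLAIM (what is proved, stated in full; the proofs are below) =====
def Claim_equal_convert_to_numbering : Prop := ∀ (s : List String), Dom_convert_to_numbering s → Spec_convert_to_numbering s (convert_to_numbering s)

-- ===== LEMMAS AND PROOFS =====

-- A's dict after processing a first-occurrence list o of elements: el ↦ its index in o
def indexOfOrder (order : List String) : PySem.Dict String Int :=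
  PySem.Dict.ofList ((PySem.List.enumerate order).map (fun p => (p.2, p.1)))

-- enumerate over an appended element
lemma enumerate_append_singleton (xs : List String) (y : String) (st : Int) :
    PySem.List.enumerate (xs ++ [y]) st
      = PySem.List.enumerate xs st ++ [(st + xs.length, y)] := by
  induction xs generalizing st with
  | nil => simp [PySem.List.enumerate_cons]
  | cons x t ih =>
      simp [PySem.List.enumerate_cons, ih]
      ring_nf

-- key membership in the swapped enumeration pairs
lemma any_enum (o : List String) (st : Int) (el : String) :
    ((PySem.List.enumerate o st).map (fun p => (p.2, p.1))).any (fun p => p.1 == el)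
      = decide (el ∈ o) := by
  induction o generalizing st with
  | nil => simp
  | cons x t ih =>
      by_cases hx : x = el
      · simp [PySem.List.enumerate_cons, ih, hx]
      · have h1 : (x == el) = false := by simpa using hx
        have h2 : (decide (el = x)) = false := by simpa using Ne.symm hx
        simp [PySem.List.enumerate_cons, ih, h1, h2]

-- the items of indexOfOrder are literally the (el, i) pairs, for a duplicate-free order list
lemma items_indexOfOrder (o : List String) (hn : o.Nodup) :
    (indexOfOrder o).items = (PySem.List.enumerate o).map (fun p => (p.2, p.1)) := by
  induction o using List.reverseRecOn with
  | nil => rfl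
  | append_singleton o x ih =>
      have hx : x ∉ o := by simp [List.nodup_append] at hn; tauto
      have hno : o.Nodup := (List.nodup_append.mp (by simpa using hn)).1
      have h1 : indexOfOrder (o ++ [x])
          = (indexOfOrder o).insert x ((0 : Int) + o.length) := by
        simp [indexOfOrder, enumerate_append_singleton, PySem.Dict.ofList, PySem.Dict.update]
      rw [h1, PySem.Dict.insert]
      have hc : (indexOfOrder o).contains x = false := by
        rw [PySem.Dict.contains, ih hno, any_enum]
        simpa using hx
      rw [hc]
      simp [ih hno, enumerate_append_singleton]

-- find? over the swapped enumeration pairs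
lemma find?_enum (o : List String) (st : Int) (el : String) :
    ((PySem.List.enumerate o st).map (fun p => (p.2, p.1))).find? (fun p => p.1 == el)
      = if el ∈ o then some (el, st + (o.idxOf el : Int)) else none := by
  induction o generalizing st with
  | nil => simp
  | cons x t ih =>
      by_cases hx : x = el
      · subst hx
        simp [PySem.List.enumerate_cons]
      · simp [PySem.List.enumerate_cons, hx, ih]
        by_cases hm : el ∈ t
        · simp [hm, Ne.symm hx]
          ring
        · simp [hm, Ne.symm hx]

lemma get?_indexOfOrder (o : List String) (hn : o.Nodup) (el : String) :
    (indexOfOrder o).get? el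
      = if el ∈ o then some ((o.idxOf el : Int)) else none := by
  rw [PySem.Dict.get?, items_indexOfOrder o hn, find?_enum]
  by_cases hm : el ∈ o <;> simp [hm]

lemma contains_indexOfOrder (o : List String) (hn : o.Nodup) (el : String) :
    (indexOfOrder o).contains el = decide (el ∈ o) := by
  rw [PySem.Dict.contains, items_indexOfOrder o hn, any_enum]

lemma size_indexOfOrder (o : List String) (hn : o.Nodup) :
    (indexOfOrder o).size = o.length := by
  rw [PySem.Dict.size, items_indexOfOrder o hn]
  simp [PySem.List.length_enumerate]

lemma indexOfOrder_append (o : List String) (x : String) :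
    indexOfOrder (o ++ [x]) = (indexOfOrder o).insert x (o.length : Int) := by
  simp [indexOfOrder, enumerate_append_singleton, PySem.Dict.ofList, PySem.Dict.update]

-- the accumulating first-occurrence list is a prefix of its future value
lemma prefix_foldl_add (rest o : List String) :
    o <+: rest.foldl PySem.Set.add o := by
  induction rest generalizing o with
  | nil => simp
  | cons x t ih =>
      refine List.IsPrefix.trans ?_ (ih (PySem.Set.add o x))
      by_cases h : x ∈ o
      · simp [PySem.Set.add, PySem.Set.contains, h]
      · simp [PySem.Set.add, PySem.Set.contains, h]

-- A's loop invariant: with seen = indexOfOrder o, every appended number is the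
-- element's index in the final first-occurrence list
lemma loopA (rest : List String) (num : List Int) (o : List String) (hn : o.Nodup) :
    (rest.foldl convertStep (num, indexOfOrder o)).1
      = num ++ rest.map (fun el => (((rest.foldl PySem.Set.add o).idxOf el : Int))) := by
  induction rest generalizing num o with
  | nil => simp
  | cons el rest' ih =>
      simp only [List.foldl_cons, List.map_cons]
      have hadd : PySem.Set.add o el = if el ∈ o then o else o ++ [el] := by
        by_cases hm : el ∈ o <;> simp [PySem.Set.add, PySem.Set.contains, hm]
      have hn' : (PySem.Set.add o el).Nodup := by
        rw [hadd]
        by_cases hm : el ∈ o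
        · simpa [hm] using hn
        · simp [hm, List.nodup_append, hn]
          exact fun a ha h => hm (h ▸ ha)
      have hmem : el ∈ PySem.Set.add o el := by
        rw [hadd]; by_cases hm : el ∈ o <;> simp [hm]
      have hstep : convertStep (num, indexOfOrder o) el
          = (num ++ [(((PySem.Set.add o el).idxOf el : Nat) : Int)], indexOfOrder (PySem.Set.add o el)) := by
        by_cases hm : el ∈ o
        · have ho : PySem.Set.add o el = o := by rw [hadd]; simp [hm]
          simp [convertStep, contains_indexOfOrder o hn, hm, get?_indexOfOrder o hn]
        · have ho : PySem.Set.add o el = o ++ [el] := by rw [hadd]; simp [hm]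
          have hno' : (o ++ [el]).Nodup := ho ▸ hn'
          have hc : (indexOfOrder o).contains el = false := by
            rw [contains_indexOfOrder o hn]; simpa using hm
          have hins : (indexOfOrder o).insert el ((indexOfOrder o).size : Int)
              = indexOfOrder (o ++ [el]) := by
            rw [size_indexOfOrder o hn, indexOfOrder_append]
          simp only [convertStep, hc, Bool.false_eq_true, if_false]
          rw [hins, get?_indexOfOrder _ hno' el, ho]
          simp
      rw [hstep, ih _ _ hn']
      have hpre : PySem.Set.add o el <+: rest'.foldl PySem.Set.add (PySem.Set.add o el) :=
        prefix_foldl_add rest' (PySem.Set.add o el)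
      obtain ⟨t, ht⟩ := hpre
      rw [← ht, List.idxOf_append]
      simp [hmem]

-- B's per-element value: for el ∈ s with first occurrence at k, the number of
-- distinct elements in s[:k] is el's index in the first-occurrence list of s
lemma rank_eq (s : List String) (el : String) (k : Nat)
    (hk : PySem.List.index? s el = some k) :
    ((PySem.Set.ofList s).idxOf el) = (PySem.Set.ofList (s.take k)).length := by
  obtain ⟨pre, suf, hs, hlen, hnp⟩ := (PySem.List.index?_eq_some_iff s el k).mp hk
  subst hs
  have htake : (pre ++ el :: suf).take k = pre := by
    subst hlen; simp
  rw [htake]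
  have hnpre : el ∉ PySem.Set.ofList pre := by
    rw [PySem.Set.mem_ofList]; exact hnp
  have hof : PySem.Set.ofList (pre ++ el :: suf)
      = suf.foldl PySem.Set.add (PySem.Set.ofList pre ++ [el]) := by
    rw [PySem.Set.ofList_eq_foldl, List.foldl_append, List.foldl_cons,
        ← PySem.Set.ofList_eq_foldl]
    congr 1
    simp [PySem.Set.add, PySem.Set.contains, hnpre]
  rw [hof]
  obtain ⟨t, ht⟩ := prefix_foldl_add suf (PySem.Set.ofList pre ++ [el])
  rw [← ht, List.append_assoc, List.idxOf_append]
  simp [hnpre]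

theorem body_eq (s : List String) :
    convert_to_numbering s = convert_to_numbering_alt s := by
  have hA : convert_to_numbering s
      = s.map (fun el => (((PySem.Set.ofList s).idxOf el : Nat) : Int)) := by
    have := loopA s [] [] List.nodup_nil
    simpa [convert_to_numbering, PySem.Set.ofList] using this
  rw [hA, convert_to_numbering_alt]
  apply List.map_congr_left
  intro el hel
  obtain ⟨k, hk⟩ := Option.isSome_iff_exists.mp
    ((PySem.List.index?_isSome_iff s el).mpr hel)
  rw [hk]
  simp only [Option.getD_some]
  rw [PySem.List.slice_to_natCast]
  rw [rank_eq s el k hk]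
  simp [PySem.Set.len]

-- ===== VERDICT (by name: the statement is the Claim_ definition above) =====
theorem convert_to_numbering_spec : Claim_equal_convert_to_numbering := by
  intro s _
  exact body_eq s
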